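-- pv_equiv track=rewrite | github.com/Sanghyeok-Jeon/Algorithms_Python | 백준/Silver/21921. 블로그/블로그.py | max_visitors
-- ===== SOURCE A (Python) =====
-- def max_visitors(n, x, visitors):
--     current_sum = sum(visitors[:x])
--     max_sum = current_sum
--     max_count = 1
--
--     for i in range(x, n):
--         current_sum += visitors[i] - visitors[i - x]
--
--         if current_sum > max_sum:
--             max_sum = current_sum
--             max_count = 1
--         elif current_sum == max_sum:
--             max_count += 1
--
--     return max_sum, max_count
-- ===== SOURCE B (Python) =====
-- def max_visitors(n, x, visitors):
--     # Prefix-sum array: each window sum is a difference of two prefix sums.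
--     P = [0]
--     s = 0
--     for v in visitors:
--         s += v
--         P.append(s)
--     best = P[min(x, len(visitors))]
--     count = 1
--     for i in range(1, n - x + 1):
--         w = P[i + x] - P[i]
--         if w > best:
--             best, count = w, 1
--         elif w == best:
--             count += 1
--     return best, count
-- ===== Notes on version B (the rewrite author's own statement) =====
-- stated objective: alternative
-- what changed: Replaces the sliding-window running sum with a prefix-sum array built once, so every window sum is computed directly as a difference P[i+x]-P[i] of two prefix sums instead of being maintained incrementally.
-- outside the precondition, e.g. on max_visitors(-5, -2, [3, 4]): A returns (0, 1), B returns (3, 1)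
import Mathlib
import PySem

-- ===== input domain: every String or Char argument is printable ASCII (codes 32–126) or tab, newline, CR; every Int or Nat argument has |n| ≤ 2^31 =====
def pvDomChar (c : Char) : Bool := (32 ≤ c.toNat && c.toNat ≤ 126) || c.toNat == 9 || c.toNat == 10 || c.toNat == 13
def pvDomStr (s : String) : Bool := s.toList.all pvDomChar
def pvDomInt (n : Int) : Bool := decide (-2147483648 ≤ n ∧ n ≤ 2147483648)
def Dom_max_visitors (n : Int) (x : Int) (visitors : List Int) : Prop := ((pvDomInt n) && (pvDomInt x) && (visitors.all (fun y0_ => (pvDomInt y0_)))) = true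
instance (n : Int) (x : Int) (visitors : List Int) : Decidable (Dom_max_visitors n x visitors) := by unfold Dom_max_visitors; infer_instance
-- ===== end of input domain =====

-- B replaces A's sliding-window running sum by a prefix-sum array (window sum = P[i+x]-P[i]); alternative decomposition, same cost.


-- ===== PORT A =====
def max_visitors (n : Int) (x : Int) (visitors : List Int) : Int × Int :=
  let cs0 := (PySem.List.slice visitors none (some x)).sum
  let st := (PySem.List.pyRange x n 1).foldl
    (fun (st : Int × Int × Int) i =>
      let cs := st.1 + PySem.List.pyGetD visitors i 0 - PySem.List.pyGetD visitors (i - x) 0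
      if cs > st.2.1 then (cs, cs, 1)
      else if cs = st.2.1 then (cs, st.2.1, st.2.2 + 1)
      else (cs, st.2.1, st.2.2)) (cs0, cs0, 1)
  (st.2.1, st.2.2)

-- ===== PORT B =====
def max_visitors_alt (n : Int) (x : Int) (visitors : List Int) : Int × Int :=
  let Ps := visitors.foldl (fun (ps : List Int × Int) v => (ps.1 ++ [ps.2 + v], ps.2 + v)) ([0], 0)
  let P := Ps.1
  let best0 := PySem.List.pyGetD P (min x (visitors.length : Int)) 0
  (PySem.List.pyRange 1 (n - x + 1) 1).foldl
    (fun (bc : Int × Int) i =>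
      let w := PySem.List.pyGetD P (i + x) 0 - PySem.List.pyGetD P i 0
      if w > bc.1 then (w, 1)
      else if w = bc.1 then (bc.1, bc.2 + 1)
      else bc) (best0, 1)

-- ===== PRECONDITION & SPEC =====
-- Pre_ restricts to the task's natural domain: x ≥ 0 and n within the list (or n ≤ x, empty loop);
-- outside it A either raises IndexError or reads through Python's negative-index wraparound,
-- which lies outside the problem's natural domain (the contest guarantees 1 ≤ x ≤ n = len(visitors)).
def Pre_max_visitors (n : Int) (x : Int) (visitors : List Int) : Prop :=
  0 ≤ x ∧ (n ≤ (visitors.length : Int) ∨ n ≤ x)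
instance (n : Int) (x : Int) (visitors : List Int) : Decidable (Pre_max_visitors n x visitors) := by unfold Pre_max_visitors; infer_instance
def pvWitness_max_visitors : Int × Int × List Int := (4, 2, [1, 5, 2, 5])

def Spec_max_visitors (n : Int) (x : Int) (visitors : List Int) (out : Int × Int) : Prop := out = max_visitors_alt n x visitors
instance (n : Int) (x : Int) (visitors : List Int) (out : Int × Int) : Decidable (Spec_max_visitors n x visitors out) := by unfold Spec_max_visitors; infer_instance

-- ===== CLAIM (what is proved, stated in full; the proofs are below) =====
def Claim_equal_max_visitors : Prop := ∀ (n : Int) (x : Int) (visitors : List Int), Dom_max_visitors n x visitors → Pre_max_visitors n x visitors → Spec_max_visitors n x visitors (max_visitors n x visitors)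

-- ===== LEMMAS AND PROOFS =====


def pvTrack (bc : Int × Int) (w : Int) : Int × Int :=
  if w > bc.1 then (w, 1) else if w = bc.1 then (bc.1, bc.2 + 1) else bc

def pvW (vs : List Int) (x' : Nat) (j : Nat) : Int := ((vs.drop j).take x').sum

lemma pfx_spec (vs : List Int) :
    vs.foldl (fun (ps : List Int × Int) v => (ps.1 ++ [ps.2 + v], ps.2 + v)) ([0], 0)
      = ((List.range (vs.length + 1)).map (fun t => (vs.take t).sum), vs.sum) := by
  induction vs using List.reverseRecOn with
  | nil => simp
  | append_singleton l v ih =>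
    rw [List.foldl_append, ih]
    simp only [List.foldl_cons, List.foldl_nil, Prod.mk.injEq]
    refine ⟨?_, by simp⟩
    have h2 : (l ++ [v]).length + 1 = (l.length + 1) + 1 := by simp
    conv_rhs => rw [h2, List.range_succ, List.map_append]
    congr 1
    · apply List.map_congr_left
      intro t ht
      rw [List.mem_range] at ht
      rw [List.take_append_of_le_length (by omega)]
    · simp [List.take_of_length_le (by simp : (l ++ [v]).length ≤ l.length + 1)]

lemma pfx_getD (vs : List Int) (t : Nat) (ht : t ≤ vs.length) :
    (vs.foldl (fun (ps : List Int × Int) v => (ps.1 ++ [ps.2 + v], ps.2 + v)) ([0], 0)).1.getD t 0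
      = (vs.take t).sum := by
  rw [pfx_spec]
  simp [List.getD_eq_getElem?_getD, Nat.lt_succ_of_le ht]

lemma pvW_slide (vs : List Int) (x' j : Nat) (h : j + x' < vs.length) :
    pvW vs x' (j + 1) = pvW vs x' j + vs.getD (j + x') 0 - vs.getD j 0 := by
  cases x' with
  | zero => simp [pvW]
  | succ m =>
    have hj : j < vs.length := by omega
    have hjm : j + 1 + m < vs.length := by omega
    unfold pvW
    rw [List.take_add_one]
    rw [List.getElem?_drop]
    rw [List.getElem?_eq_getElem hjm]
    conv_rhs => rw [List.drop_eq_getElem_cons hj]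
    rw [List.take_succ_cons]
    rw [List.getD_eq_getElem vs 0 (by omega), List.getD_eq_getElem vs 0 hj]
    simp [List.sum_append]
    have hge : vs[j + 1 + m] = vs[j + (m + 1)] := by congr 1; omega
    rw [hge]
    ring

lemma window_eq (vs : List Int) (x' j : Nat) :
    (vs.take (j + x')).sum = (vs.take j).sum + pvW vs x' j := by
  rw [List.take_add, List.sum_append, pvW]

lemma A_loop (vs : List Int) (x' : Nat) :
    ∀ (k j : Nat) (ms mc : Int), j + x' + k ≤ vs.length →
    (PySem.List.pyRange ((x' : Int) + (j : Int)) ((x' : Int) + (j : Int) + (k : Int)) 1).foldl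
      (fun (st : Int × Int × Int) i =>
        let cs := st.1 + PySem.List.pyGetD vs i 0 - PySem.List.pyGetD vs (i - (x' : Int)) 0
        if cs > st.2.1 then (cs, cs, 1)
        else if cs = st.2.1 then (cs, st.2.1, st.2.2 + 1)
        else (cs, st.2.1, st.2.2)) (pvW vs x' j, ms, mc)
    = (pvW vs x' (j + k), ((List.range' (j+1) k).map (pvW vs x')).foldl pvTrack (ms, mc)) := by
  intro k
  induction k with
  | zero =>
    intro j ms mc h
    rw [PySem.List.pyRange_one_eq_nil (by push_cast; omega)]
    simp
  | succ k ih =>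
    intro j ms mc h
    rw [PySem.List.pyRange_one_cons (by push_cast; omega)]
    rw [List.foldl_cons]
    have e1 : ((x' : Int) + (j : Int)) = ((x' + j : Nat) : Int) := by push_cast; ring
    have e2 : ((x' : Int) + (j : Int)) - (x' : Int) = ((j : Nat) : Int) := by ring
    have hcs : pvW vs x' j + PySem.List.pyGetD vs ((x' : Int) + (j : Int)) 0
        - PySem.List.pyGetD vs ((x' : Int) + (j : Int) - (x' : Int)) 0 = pvW vs x' (j + 1) := by
      rw [e2, e1, PySem.List.pyGetD_natCast, PySem.List.pyGetD_natCast]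
      rw [pvW_slide vs x' j (by omega)]
      rw [show x' + j = j + x' by omega]
    have hstep : ∀ st : Int × Int × Int, st.1 = pvW vs x' j →
        (let cs := st.1 + PySem.List.pyGetD vs ((x' : Int) + (j : Int)) 0
            - PySem.List.pyGetD vs ((x' : Int) + (j : Int) - (x' : Int)) 0
         if cs > st.2.1 then (cs, cs, 1)
         else if cs = st.2.1 then (cs, st.2.1, st.2.2 + 1)
         else (cs, st.2.1, st.2.2) : Int × Int × Int)
        = (pvW vs x' (j + 1), pvTrack (st.2.1, st.2.2) (pvW vs x' (j + 1))) := by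
      intro st hst
      simp only [hst, hcs, pvTrack]
      split_ifs <;> rfl
    rw [hstep (pvW vs x' j, ms, mc) rfl]
    have e3 : ((x' : Int) + (j : Int)) + 1 = (x' : Int) + ((j + 1 : Nat) : Int) := by push_cast; ring
    have e4 : ((x' : Int) + (j : Int) + ((k + 1 : Nat) : Int)) = (x' : Int) + ((j + 1 : Nat) : Int) + (k : Int) := by push_cast; ring
    rw [e3, e4, ih (j + 1) _ _ (by omega)]
    rw [List.range'_succ, List.map_cons, List.foldl_cons]
    have : j + 1 + k = j + (k + 1) := by omega
    rw [this]

lemma B_loop (vs P : List Int) (x' : Nat)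
    (hP : ∀ t : Nat, t ≤ vs.length → P.getD t 0 = (vs.take t).sum) :
    ∀ (k j : Nat) (bc : Int × Int), j + x' + k ≤ vs.length + 1 →
    (PySem.List.pyRange (j : Int) ((j : Int) + (k : Int)) 1).foldl
      (fun (bc : Int × Int) i =>
        let w := PySem.List.pyGetD P (i + (x' : Int)) 0 - PySem.List.pyGetD P i 0
        if w > bc.1 then (w, 1)
        else if w = bc.1 then (bc.1, bc.2 + 1)
        else bc) bc
    = ((List.range' j k).map (pvW vs x')).foldl pvTrack bc := by
  intro k
  induction k with
  | zero =>
    intro j bc h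
    rw [PySem.List.pyRange_one_eq_nil (by push_cast; omega)]
    simp
  | succ k ih =>
    intro j bc h
    rw [PySem.List.pyRange_one_cons (by push_cast; omega)]
    rw [List.foldl_cons]
    have e1 : ((j : Int) + (x' : Int)) = ((j + x' : Nat) : Int) := by push_cast; ring
    have hw : PySem.List.pyGetD P ((j : Int) + (x' : Int)) 0 - PySem.List.pyGetD P (j : Int) 0
        = pvW vs x' j := by
      rw [e1, PySem.List.pyGetD_natCast, PySem.List.pyGetD_natCast]
      rw [hP (j + x') (by omega), hP j (by omega), window_eq]
      ring
    have hstep : ∀ bc' : Int × Int,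
        (let w := PySem.List.pyGetD P ((j : Int) + (x' : Int)) 0 - PySem.List.pyGetD P (j : Int) 0
         if w > bc'.1 then (w, 1)
         else if w = bc'.1 then (bc'.1, bc'.2 + 1)
         else bc' : Int × Int)
        = pvTrack bc' (pvW vs x' j) := by
      intro bc'
      simp only [hw, pvTrack]
    rw [hstep bc]
    have e3 : ((j : Int)) + 1 = ((j + 1 : Nat) : Int) := by push_cast; ring
    have e4 : ((j : Int) + ((k + 1 : Nat) : Int)) = ((j + 1 : Nat) : Int) + (k : Int) := by push_cast; ring
    rw [e3, e4, ih (j + 1) _ (by omega)]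
    rw [List.range'_succ, List.map_cons, List.foldl_cons]

theorem max_visitors_spec : Claim_equal_max_visitors := by
  intro n x vs _ hpre
  obtain ⟨hx, hn⟩ := hpre
  unfold Spec_max_visitors
  lift x to Nat using hx with x'
  simp only [max_visitors, max_visitors_alt]
  have hP : ∀ t : Nat, t ≤ vs.length →
      (vs.foldl (fun (ps : List Int × Int) v => (ps.1 ++ [ps.2 + v], ps.2 + v)) ([0], 0)).1.getD t 0
        = (vs.take t).sum := fun t ht => pfx_getD vs t ht
  have hbest : PySem.List.pyGetD
      (vs.foldl (fun (ps : List Int × Int) v => (ps.1 ++ [ps.2 + v], ps.2 + v)) ([0], 0)).1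
      (min (x' : Int) (vs.length : Int)) 0 = pvW vs x' 0 := by
    by_cases hxl : (x' : Int) ≤ (vs.length : Int)
    · rw [min_eq_left hxl, PySem.List.pyGetD_natCast, hP x' (by exact_mod_cast hxl)]
      simp [pvW]
    · rw [min_eq_right (by omega), PySem.List.pyGetD_natCast, hP vs.length le_rfl]
      simp [pvW, List.take_of_length_le (by omega : vs.length ≤ x')]
  have hcs0 : (PySem.List.slice vs none (some (x' : Int))).sum = pvW vs x' 0 := by
    rw [PySem.List.slice_to vs (Int.natCast_nonneg x')]
    simp [pvW]
  rw [hcs0, hbest]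
  by_cases hcase : n ≤ (x' : Int)
  · rw [PySem.List.pyRange_one_eq_nil hcase,
      PySem.List.pyRange_one_eq_nil (by omega : n - (x' : Int) + 1 ≤ 1)]
    simp
  · have hnl : n ≤ (vs.length : Int) := hn.resolve_right (by omega)
    have hk : ((n - (x' : Int)).toNat : Int) = n - (x' : Int) := Int.toNat_of_nonneg (by omega)
    have hlen : 0 + x' + (n - (x' : Int)).toNat ≤ vs.length := by omega
    have erangeA : PySem.List.pyRange ((x' : Int)) n 1
        = PySem.List.pyRange ((x' : Int) + ((0 : Nat) : Int))
            ((x' : Int) + ((0 : Nat) : Int) + (((n - (x' : Int)).toNat : Nat) : Int)) 1 := by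
      congr 1
      push_cast
      omega
    have erangeB : PySem.List.pyRange 1 (n - (x' : Int) + 1) 1
        = PySem.List.pyRange (((1 : Nat) : Int))
            ((((1 : Nat) : Int)) + (((n - (x' : Int)).toNat : Nat) : Int)) 1 := by
      congr 1
      push_cast
      omega
    rw [erangeA, erangeB,
      A_loop vs x' (n - (x' : Int)).toNat 0 (pvW vs x' 0) 1 hlen,
      B_loop vs _ x' hP (n - (x' : Int)).toNat 1 (pvW vs x' 0, 1) (by omega)]
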